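-- pv_equiv track=rewrite | github.com/vem54/gpu-jason | gpu_poker_cfr/solvers/semi_vector_leduc_fast.py | _facing_bet
-- ===== SOURCE A (Python) =====
-- def _facing_bet(actions):
--     """Check if current player is facing a bet."""
--     if not actions:
--         return False
--     # Find last bet and count calls after it
--     for i in range(len(actions) - 1, -1, -1):
--         if actions[i] == 'b':
--             calls_after = sum(1 for a in actions[i+1:] if a == 'c')
--             return calls_after == 0
--     return False
-- ===== SOURCE B (Python) =====
-- def _facing_bet(actions):
--     """Check if current player is facing a bet."""
--     facing = False
--     for a in actions:
--         if a == 'b':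
--             facing = True
--         elif a == 'c':
--             facing = False
--     return facing
-- ===== Notes on version B (the rewrite author's own statement) =====
-- stated objective: simpler
-- what changed: Replaced the backward search for the last 'b' plus a suffix count of 'c's with a single forward pass maintaining one boolean 'facing' flag (set by 'b', cleared by 'c').
import Mathlib
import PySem

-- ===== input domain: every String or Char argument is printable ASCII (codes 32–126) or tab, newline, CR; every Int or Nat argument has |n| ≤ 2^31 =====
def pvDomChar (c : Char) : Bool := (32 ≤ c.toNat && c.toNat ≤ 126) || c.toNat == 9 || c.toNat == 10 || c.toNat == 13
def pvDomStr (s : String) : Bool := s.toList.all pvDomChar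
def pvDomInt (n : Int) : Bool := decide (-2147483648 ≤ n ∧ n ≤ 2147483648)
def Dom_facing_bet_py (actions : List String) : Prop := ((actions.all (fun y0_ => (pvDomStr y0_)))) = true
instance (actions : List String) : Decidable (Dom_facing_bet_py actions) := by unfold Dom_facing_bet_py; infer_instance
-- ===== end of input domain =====

-- B replaces A's backward search for the last 'b' (with an inner suffix count of 'c's)
-- by a single forward pass over the actions maintaining one boolean flag: simpler.

-- ===== PORT A =====
-- backward loop "for i in range(len(actions)-1, -1, -1)" over the explicit index list
def pvLoopA (actions : List String) : List Int → Bool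
  | [] => false
  | i :: rest =>
    if PySem.List.pyGetD actions i "" = "b" then
      -- calls_after = sum(1 for a in actions[i+1:] if a == 'c'); return calls_after == 0
      decide ((((PySem.List.slice actions (some (i + 1)) none).filter
                 (fun a => a = "c")).map (fun _ => (1 : Int))).sum = 0)
    else pvLoopA actions rest

def facing_bet_py (actions : List String) : Bool :=
  if actions = [] then false
  else pvLoopA actions (PySem.List.pyRange ((actions.length : Int) - 1) (-1) (-1))

-- ===== PORT B =====
def facing_bet_py_alt (actions : List String) : Bool :=
  actions.foldl (fun facing a => if a = "b" then true else if a = "c" then false else facing) false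

-- ===== PRECONDITION & SPEC =====
def Spec_facing_bet_py (actions : List String) (out : Bool) : Prop := out = facing_bet_py_alt actions
instance (actions : List String) (out : Bool) : Decidable (Spec_facing_bet_py actions out) := by unfold Spec_facing_bet_py; infer_instance

-- ===== CLAIM (what is proved, stated in full; the proofs are below) =====
def Claim_equal_facing_bet_py : Prop := ∀ (actions : List String), Dom_facing_bet_py actions → Spec_facing_bet_py actions (facing_bet_py actions)

-- ===== LEMMAS AND PROOFS =====

-- A's entry unconditionally equals the loop (the empty guard is redundant: the range is empty there)
theorem facing_bet_py_eq_loop (actions : List String) :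
    facing_bet_py actions = pvLoopA actions (PySem.List.pyRange ((actions.length : Int) - 1) (-1) (-1)) := by
  unfold facing_bet_py
  split_ifs with h
  · subst h
    rw [PySem.List.pyRange_neg_one_eq_nil (by norm_num)]
    rfl
  · rfl

-- appending a 'c' makes the loop return false on any in-range index list
theorem pvLoopA_append_c (xs : List String) (idxs : List Int)
    (h : ∀ i ∈ idxs, 0 ≤ i ∧ i < (xs.length : Int)) :
    pvLoopA (xs ++ ["c"]) idxs = false := by
  induction idxs with
  | nil => rfl
  | cons i rest ih =>
    obtain ⟨h0, hlt⟩ := h i (List.mem_cons_self ..)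
    obtain ⟨k, rfl⟩ := Int.eq_ofNat_of_zero_le h0
    unfold pvLoopA
    split_ifs with hb
    · have hslice : PySem.List.slice (xs ++ ["c"]) (some ((k : Int) + 1)) none
          = xs.drop (k + 1) ++ ["c"] := by
        have : ((k : Int) + 1) = ((k + 1 : Nat) : Int) := by push_cast; ring
        rw [this, PySem.List.slice_from_natCast, List.drop_append_of_le_length (by omega)]
      simp [hslice, List.filter_append]
      have : (0 : Int) ≤ (((xs.drop (k + 1)).filter (fun a => decide (a = "c"))).map
          (fun _ => (1 : Int))).sum := by
        apply List.sum_nonneg; intro x hx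
        simp at hx; omega
      omega
    · exact ih (fun j hj => h j (List.mem_cons_of_mem _ hj))

-- appending a non-'b' non-'c' action does not change the loop on in-range indices
theorem pvLoopA_append_other (xs : List String) (x : String) (hx : x ≠ "c") (idxs : List Int)
    (h : ∀ i ∈ idxs, 0 ≤ i ∧ i < (xs.length : Int)) :
    pvLoopA (xs ++ [x]) idxs = pvLoopA xs idxs := by
  induction idxs with
  | nil => rfl
  | cons i rest ih =>
    obtain ⟨h0, hlt⟩ := h i (List.mem_cons_self ..)
    obtain ⟨k, rfl⟩ := Int.eq_ofNat_of_zero_le h0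
    have hk : k < xs.length := by exact_mod_cast hlt
    unfold pvLoopA
    have hget : PySem.List.pyGetD (xs ++ [x]) (k : Int) "" = PySem.List.pyGetD xs (k : Int) "" := by
      rw [PySem.List.pyGetD_natCast, PySem.List.pyGetD_natCast,
        List.getD_eq_getElem?_getD, List.getD_eq_getElem?_getD,
        List.getElem?_append_left hk]
    rw [hget]
    split_ifs with hb
    · have hslice : PySem.List.slice (xs ++ [x]) (some ((k : Int) + 1)) none
          = xs.drop (k + 1) ++ [x] := by
        have : ((k : Int) + 1) = ((k + 1 : Nat) : Int) := by push_cast; ring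
        rw [this, PySem.List.slice_from_natCast, List.drop_append_of_le_length (by omega)]
      have hslice2 : PySem.List.slice xs (some ((k : Int) + 1)) none = xs.drop (k + 1) := by
        have : ((k : Int) + 1) = ((k + 1 : Nat) : Int) := by push_cast; ring
        rw [this, PySem.List.slice_from_natCast]
      rw [hslice, hslice2]
      simp [List.filter_append, hx]
    · exact ih (fun j hj => h j (List.mem_cons_of_mem _ hj))

-- every index produced by the countdown range over xs is in range
theorem pvRange_in_range (xs : List String) (i : Int)
    (hi : i ∈ PySem.List.pyRange ((xs.length : Int) - 1) (-1) (-1)) :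
    0 ≤ i ∧ i < (xs.length : Int) := by
  rw [PySem.List.mem_pyRange_neg_one] at hi
  omega

theorem facing_eq (actions : List String) : facing_bet_py actions = facing_bet_py_alt actions := by
  induction actions using List.reverseRecOn with
  | nil => rfl
  | append_singleton xs x ih =>
    rw [facing_bet_py_eq_loop]
    unfold facing_bet_py_alt
    rw [List.foldl_append]
    simp only [List.foldl_cons, List.foldl_nil]
    have hlen : ((xs ++ [x]).length : Int) - 1 = (xs.length : Int) := by
      simp
    rw [hlen, PySem.List.pyRange_neg_one_cons (by omega)]
    unfold pvLoopA
    have hget : PySem.List.pyGetD (xs ++ [x]) ((xs.length : Int)) "" = x := by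
      rw [PySem.List.pyGetD_natCast, List.getD_eq_getElem?_getD]
      simp
    rw [hget]
    by_cases hb : x = "b"
    · subst hb
      rw [if_pos rfl]
      have hslice : PySem.List.slice (xs ++ ["b"]) (some ((xs.length : Int) + 1)) none = [] := by
        have : ((xs.length : Int) + 1) = ((xs.length + 1 : Nat) : Int) := by push_cast; ring
        rw [this, PySem.List.slice_from_natCast]
        simp
      simp [hslice]
    · rw [if_neg hb]
      by_cases hc : x = "c"
      · subst hc
        rw [pvLoopA_append_c xs _ (fun i hi => pvRange_in_range xs i hi)]
        rw [if_neg hb, if_pos rfl]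
      · rw [pvLoopA_append_other xs x hc _ (fun i hi => pvRange_in_range xs i hi)]
        rw [← facing_bet_py_eq_loop xs, ih, if_neg hb, if_neg hc]
        rfl

-- ===== VERDICT (by name: the statement is the Claim_ definition above) =====
theorem facing_bet_py_spec : Claim_equal_facing_bet_py := by
  intro actions _
  unfold Spec_facing_bet_py
  exact facing_eq actions
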